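-- pv_equiv track=rewrite | github.com/AdamZhouSE/pythonHomework | Code/CodeRecords/2972/60605/263195.py | showDupSubString
-- ===== SOURCE A (Python) =====
-- def showDupSubString(s):
--     s = list(s)
--     li = []
--     templi = []
--     lastTemp = None
--     for i in s:
--         if lastTemp != i:
--             if len(templi) > 1:
--                 li.append(templi.copy())
--             lastTemp = i
--             templi = [i]
--         else:
--             templi.append(i)
--     if len(templi) > 1:
--         li.append(templi)
--     return li
-- ===== SOURCE B (Python) =====
-- def showDupSubString(s):
--     cs = list(s)
--     res = []
--     n = len(cs)
--     i = 0
--     while i < n: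
--         j = i + 1
--         while j < n and cs[j] == cs[i]:
--             j += 1
--         if j - i > 1:
--             res.append(cs[i:j])
--         i = j
--     return res
-- ===== Notes on version B (the rewrite author's own statement) =====
-- stated objective: simpler
-- what changed: Replaces A's single-pass state machine (lastTemp/templi accumulators with an after-loop flush) by a span decomposition: take the maximal run at the head, keep it if longer than one, recurse on the rest.
import Mathlib
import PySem

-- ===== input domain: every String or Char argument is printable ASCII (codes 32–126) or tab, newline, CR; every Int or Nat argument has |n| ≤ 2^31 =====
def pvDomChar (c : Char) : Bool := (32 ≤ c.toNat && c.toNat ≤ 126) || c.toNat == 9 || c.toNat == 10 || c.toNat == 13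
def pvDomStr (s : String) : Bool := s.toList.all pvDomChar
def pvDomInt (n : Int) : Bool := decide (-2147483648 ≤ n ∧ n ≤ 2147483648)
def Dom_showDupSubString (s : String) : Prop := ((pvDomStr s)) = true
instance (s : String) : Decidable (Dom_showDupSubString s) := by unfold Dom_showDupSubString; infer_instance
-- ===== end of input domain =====

-- B replaces A's lastTemp/templi state machine by a head-run span decomposition (same O(n) cost, simpler).

-- ===== PORT A =====
-- A's for-loop over list(s) with state (li, templi, lastTemp); list(s) = one-char strings.
def showDupSubStringGo : List String → List (List String) × List String × Option String →
    List (List String) × List String × Option String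
  | [], st => st
  | i :: rest, (li, templi, lastTemp) =>
    if lastTemp ≠ some i then
      showDupSubStringGo rest ((if templi.length > 1 then li ++ [templi] else li), [i], some i)
    else
      showDupSubStringGo rest (li, templi ++ [i], lastTemp)

def showDupSubString (s : String) : List (List String) :=
  let st := showDupSubStringGo (s.toList.map (fun c => String.ofList [c])) ([], [], none)
  if st.2.1.length > 1 then st.1 ++ [st.2.1] else st.1

-- ===== PORT B =====
-- Source B's go: peel the maximal run at the head (xs[:k] / xs[k:]), keep it if k > 1, recurse.
def showDupSubStringAltGo : List String → List (List String)
  | [] => []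
  | c :: rest =>
    let run := rest.takeWhile (· == c)
    (if (c :: run).length > 1 then [c :: run] else []) ++
      showDupSubStringAltGo (rest.dropWhile (· == c))
termination_by xs => xs.length
decreasing_by
  simp only [List.length_cons]
  exact Nat.lt_succ_of_le (List.length_dropWhile_le _ _)

def showDupSubString_alt (s : String) : List (List String) :=
  showDupSubStringAltGo (s.toList.map (fun c => String.ofList [c]))

-- ===== PRECONDITION & SPEC =====
def Spec_showDupSubString (s : String) (out : List (List String)) : Prop := out = showDupSubString_alt s
instance (s : String) (out : List (List String)) : Decidable (Spec_showDupSubString s out) := by unfold Spec_showDupSubString; infer_instance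

-- ===== CLAIM (what is proved, stated in full; the proofs are below) =====
def Claim_equal_showDupSubString : Prop := ∀ (s : String), Dom_showDupSubString s → Spec_showDupSubString s (showDupSubString s)

-- ===== LEMMAS AND PROOFS =====

theorem takeWhile_rep {c : String} (ys : List String) :
    ∀ n, (List.replicate n c ++ ys).takeWhile (· == c) = List.replicate n c ++ ys.takeWhile (· == c) := by
  intro n
  induction n with
  | zero => simp
  | succ n ih => simp [List.replicate_succ, ih]

theorem dropWhile_rep {c : String} (ys : List String) :
    ∀ n, (List.replicate n c ++ ys).dropWhile (· == c) = ys.dropWhile (· == c) := by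
  intro n
  induction n with
  | zero => simp
  | succ n ih => simp [List.replicate_succ, ih]

theorem altGo_rep_ne {c x : String} (xs : List String) (k : Nat) (hk : 1 ≤ k) (hx : x ≠ c) :
    showDupSubStringAltGo (List.replicate k c ++ x :: xs) =
      (if k > 1 then [List.replicate k c] else []) ++ showDupSubStringAltGo (x :: xs) := by
  obtain ⟨m, rfl⟩ : ∃ m, k = m + 1 := ⟨k - 1, (Nat.succ_pred_eq_of_pos hk).symm⟩
  rw [List.replicate_succ, List.cons_append, showDupSubStringAltGo]
  have hxc : (x == c) = false := by simp [hx]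
  have ht : (List.replicate m c ++ x :: xs).takeWhile (· == c) = List.replicate m c := by
    rw [takeWhile_rep]
    simp [List.takeWhile, hxc]
  have hd : (List.replicate m c ++ x :: xs).dropWhile (· == c) = x :: xs := by
    rw [dropWhile_rep]
    simp [List.dropWhile, hxc]
  rw [ht, hd]
  simp [List.replicate_succ]

theorem altGo_rep {c : String} (k : Nat) (hk : 1 ≤ k) :
    showDupSubStringAltGo (List.replicate k c) =
      (if k > 1 then [List.replicate k c] else []) := by
  obtain ⟨m, rfl⟩ : ∃ m, k = m + 1 := ⟨k - 1, (Nat.succ_pred_eq_of_pos hk).symm⟩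
  rw [List.replicate_succ, showDupSubStringAltGo]
  have ht : (List.replicate m c).takeWhile (· == c) = List.replicate m c := by
    have := takeWhile_rep (c := c) ([] : List String) m
    simpa using this
  have hd : (List.replicate m c).dropWhile (· == c) = [] := by
    have := dropWhile_rep (c := c) ([] : List String) m
    simpa using this
  rw [ht, hd]
  simp [showDupSubStringAltGo]

def pvFinish (st : List (List String) × List String × Option String) : List (List String) :=
  if st.2.1.length > 1 then st.1 ++ [st.2.1] else st.1

theorem loop_eq (xs : List String) :
    ∀ (li : List (List String)) (c : String) (k : Nat), 1 ≤ k →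
      pvFinish (showDupSubStringGo xs (li, List.replicate k c, some c)) =
        li ++ showDupSubStringAltGo (List.replicate k c ++ xs) := by
  induction xs with
  | nil =>
    intro li c k hk
    simp [showDupSubStringGo, pvFinish, altGo_rep k hk]
    split <;> simp
  | cons x rest ih =>
    intro li c k hk
    by_cases hx : x = c
    · subst hx
      rw [showDupSubStringGo]
      simp only [ne_eq, not_true_eq_false, if_false]
      have h1 : List.replicate k x ++ [x] = List.replicate (k + 1) x := by
        rw [← List.replicate_succ']
      have h2 : List.replicate k x ++ x :: rest = List.replicate (k + 1) x ++ rest := by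
        simp [List.replicate_succ', List.append_assoc]
      rw [h1, ih li x (k + 1) (by omega), h2]
    · rw [showDupSubStringGo]
      have hne : some c ≠ some x := by simpa using fun h => hx h.symm
      simp only [hne, if_pos, ne_eq, not_false_iff]
      have hrx : [x] = List.replicate 1 x := by simp
      rw [hrx, ih _ x 1 (le_refl 1)]
      rw [altGo_rep_ne rest k hk hx]
      simp [List.length_replicate]
      split <;> simp

theorem showDupSubString_eq_alt (s : String) : showDupSubString s = showDupSubString_alt s := by
  unfold showDupSubString showDupSubString_alt
  cases h : s.toList.map (fun c => String.ofList [c]) with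
  | nil => simp [showDupSubStringGo, showDupSubStringAltGo]
  | cons x rest =>
    show pvFinish _ = _
    rw [showDupSubStringGo]
    simp only [ne_eq, reduceCtorEq, not_false_iff, if_pos, List.length_nil]
    have := loop_eq rest [] x 1 (le_refl 1)
    simpa using this

-- ===== VERDICT (by name: the statement is the Claim_ definition above) =====
theorem showDupSubString_spec : Claim_equal_showDupSubString := by
  intro s _
  unfold Spec_showDupSubString
  exact showDupSubString_eq_alt s
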